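-- pv_equiv track=rewrite | github.com/charlieqi02/RAG-Knowledge-Extraction-Attack-and-Defense-Benchmark | kedatasets/_utils.py | index_qas
-- ===== SOURCE A (Python) =====
-- def index_qas(qa_pairs):
--     unique_queries = []
--     unique_answers = []
--     q2id = {}
--     a2id = {}
--     id2q = {}
--     id2a = {}
--     qa_id = []
--
--     for qa in qa_pairs:
--         q = qa["query"]
--         c = qa["answer"]
--
--         # Process query id
--         if q not in q2id:
--             q_id = str(len(unique_queries))
--             q2id[q] = q_id
--             id2q[q_id] = q
--             unique_queries.append(q)
--         else:
--             q_id = q2id[q]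
--
--         # Process answer id
--         if c not in a2id:
--             c_id = str(len(unique_answers))
--             a2id[c] = c_id
--             id2a[c_id] = c
--             unique_answers.append(c)
--         else:
--             c_id = a2id[c]
--
--         qa_id.append({"query": q_id, "answer": c_id})
--
--     return unique_queries, unique_answers, id2q, id2a, qa_id
-- ===== SOURCE B (Python) =====
-- def index_qas(qa_pairs):
--     pairs = list(qa_pairs)
--     queries = [qa["query"] for qa in pairs]
--     answers = [qa["answer"] for qa in pairs]
--     unique_queries = list(dict.fromkeys(queries))
--     unique_answers = list(dict.fromkeys(answers))
--     q2id = {q: str(i) for i, q in enumerate(unique_queries)}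
--     a2id = {a: str(i) for i, a in enumerate(unique_answers)}
--     id2q = {str(i): q for i, q in enumerate(unique_queries)}
--     id2a = {str(i): a for i, a in enumerate(unique_answers)}
--     qa_id = [{"query": q2id[q], "answer": a2id[a]} for q, a in zip(queries, answers)]
--     return unique_queries, unique_answers, id2q, id2a, qa_id
-- ===== Notes on version B (the rewrite author's own statement) =====
-- stated objective: alternative
-- what changed: The interleaved single pass that branches per pair to grow four dicts and two lists is replaced by separate passes: extract query/answer columns, dedup each with dict.fromkeys, build the id maps by enumerate comprehensions, then emit qa_id by pure lookups.
import Mathlib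
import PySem

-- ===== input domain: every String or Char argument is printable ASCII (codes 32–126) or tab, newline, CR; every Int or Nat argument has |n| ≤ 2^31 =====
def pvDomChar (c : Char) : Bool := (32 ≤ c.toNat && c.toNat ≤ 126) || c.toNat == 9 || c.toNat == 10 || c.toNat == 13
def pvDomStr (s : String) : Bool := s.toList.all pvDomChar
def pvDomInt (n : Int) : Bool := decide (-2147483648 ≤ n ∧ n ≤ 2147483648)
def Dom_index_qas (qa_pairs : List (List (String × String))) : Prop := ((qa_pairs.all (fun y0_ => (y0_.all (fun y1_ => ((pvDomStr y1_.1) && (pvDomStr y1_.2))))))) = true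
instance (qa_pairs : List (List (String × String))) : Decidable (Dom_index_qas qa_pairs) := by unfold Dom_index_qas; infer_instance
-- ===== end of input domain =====

-- B replaces A's single interleaved branching pass by column extraction, dedup, enumerate-built
-- index dicts and a final lookup pass (objective: alternative decomposition, same O(n) cost).

-- ===== PORT A =====
structure AState where
  uq : List String
  ua : List String
  q2id : PySem.Dict String String
  a2id : PySem.Dict String String
  id2q : PySem.Dict String String
  id2a : PySem.Dict String String
  qaid : List (List (String × String))

-- loop body of A's 'for qa in qa_pairs'
def stepA (st : AState) (qa : List (String × String)) : AState :=
  match (PySem.Dict.mk qa).get? "query", (PySem.Dict.mk qa).get? "answer" with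
  | some q, some c =>
    -- Process query id
    let (q_id, st1) :=
      if st.q2id.contains q = false then
        let q_id := PySem.Int.toStr (st.uq.length : Int)
        (q_id, { st with q2id := st.q2id.insert q q_id,
                         id2q := st.id2q.insert q_id q,
                         uq := st.uq ++ [q] })
      else ((st.q2id.get? q).getD "", st)   -- the key is present on this branch, so getD is exact
    -- Process answer id
    let (c_id, st2) :=
      if st1.a2id.contains c = false then
        let c_id := PySem.Int.toStr (st1.ua.length : Int)
        (c_id, { st1 with a2id := st1.a2id.insert c c_id,
                          id2a := st1.id2a.insert c_id c,
                          ua := st1.ua ++ [c] })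
      else ((st1.a2id.get? c).getD "", st1)
    { st2 with qaid := st2.qaid ++ [[("query", q_id), ("answer", c_id)]] }
  | _, _ => st   -- Python raises KeyError here; such inputs are excluded by Pre_

def index_qas (qa_pairs : List (List (String × String))) : List String × List String × (List (String × String)) × (List (String × String)) × (List (List (String × String))) :=
  let st := qa_pairs.foldl stepA ⟨[], [], .empty, .empty, .empty, .empty, []⟩
  (st.uq, st.ua, st.id2q.items, st.id2a.items, st.qaid)

-- ===== PORT B =====
-- qa[k]; Python raises KeyError when k is absent — those inputs are excluded by Pre_
def getVal (qa : List (String × String)) (k : String) : String :=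
  ((PySem.Dict.mk qa).get? k).getD ""

-- {x: str(i) for i, x in enumerate(u)}
def mkFwd (u : List String) : PySem.Dict String String :=
  PySem.Dict.ofList ((PySem.List.enumerate u).map (fun p => (p.2, PySem.Int.toStr p.1)))

-- {str(i): x for i, x in enumerate(u)}
def mkInv (u : List String) : PySem.Dict String String :=
  PySem.Dict.ofList ((PySem.List.enumerate u).map (fun p => (PySem.Int.toStr p.1, p.2)))

def index_qas_alt (qa_pairs : List (List (String × String))) : List String × List String × (List (String × String)) × (List (String × String)) × (List (List (String × String))) :=
  let queries := qa_pairs.map (fun qa => getVal qa "query")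
  let answers := qa_pairs.map (fun qa => getVal qa "answer")
  let uq := PySem.List.dedup queries
  let ua := PySem.List.dedup answers
  let q2id := mkFwd uq
  let a2id := mkFwd ua
  let id2q := mkInv uq
  let id2a := mkInv ua
  let qaid := (queries.zip answers).map
    (fun p => [("query", (q2id.get? p.1).getD ""), ("answer", (a2id.get? p.2).getD "")])
  (uq, ua, id2q.items, id2a.items, qaid)

-- ===== PRECONDITION & SPEC =====
-- Pre_ excludes exactly the inputs where some qa dict lacks the key "query" or "answer",
-- on which the Python A raises KeyError.
def Pre_index_qas (qa_pairs : List (List (String × String))) : Prop :=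
  (qa_pairs.all (fun qa => (PySem.Dict.mk qa).contains "query" && (PySem.Dict.mk qa).contains "answer")) = true
instance (qa_pairs : List (List (String × String))) : Decidable (Pre_index_qas qa_pairs) := by unfold Pre_index_qas; infer_instance

def pvWitness_index_qas : (List (List (String × String))) :=
  [[("query", "a"), ("answer", "x")], [("query", "b"), ("answer", "x")], [("query", "a"), ("answer", "y")]]

def Spec_index_qas (qa_pairs : List (List (String × String))) (out : List String × List String × (List (String × String)) × (List (String × String)) × (List (List (String × String)))) : Prop := out = index_qas_alt qa_pairs
instance (qa_pairs : List (List (String × String))) (out : List String × List String × (List (String × String)) × (List (String × String)) × (List (List (String × String)))) : Decidable (Spec_index_qas qa_pairs out) := by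
  unfold Spec_index_qas
  haveI h3 : DecidableEq ((List (String × String)) × (List (String × String)) × (List (List (String × String)))) := instDecidableEqProd
  haveI h4 : DecidableEq (List String × (List (String × String)) × (List (String × String)) × (List (List (String × String)))) := instDecidableEqProd
  haveI h5 : DecidableEq (List String × List String × (List (String × String)) × (List (String × String)) × (List (List (String × String)))) := instDecidableEqProd
  exact h5 out (index_qas_alt qa_pairs)

-- ===== CLAIM (what is proved, stated in full; the proofs are below) =====
def Claim_equal_index_qas : Prop := ∀ (qa_pairs : List (List (String × String))), Dom_index_qas qa_pairs → Pre_index_qas qa_pairs → Spec_index_qas qa_pairs (index_qas qa_pairs)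

-- ===== LEMMAS AND PROOFS =====
theorem keys_mkFwd (u : List String) : (mkFwd u).keys = PySem.Set.ofList u := by
  rw [mkFwd, PySem.Dict.ofList, PySem.Dict.update]
  rw [PySem.Dict.keys_foldl_insert_key (key := Prod.fst) (f := fun d x => x.2)]
  rw [List.map_map]
  rw [show (Prod.fst ∘ fun p : Int × String => (p.2, PySem.Int.toStr p.1)) = (fun p : Int × String => p.2) from rfl]
  rw [PySem.List.map_snd_enumerate, PySem.Dict.keys_empty, PySem.Set.update_nil_left]

theorem contains_mkFwd (u : List String) (q : String) : (mkFwd u).contains q = decide (q ∈ u) := by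
  rw [PySem.Dict.contains_eq_decide_mem_keys, keys_mkFwd]
  simp [PySem.Set.mem_ofList]

theorem items_mkFwd (u : List String) (hu : u.Nodup) :
    (mkFwd u).items = (PySem.List.enumerate u).map (fun p => (p.2, PySem.Int.toStr p.1)) := by
  rw [mkFwd, PySem.Dict.ofList, PySem.Dict.update]
  have h2 : (List.map (fun p : String × String => p.1) ((PySem.List.enumerate u).map (fun p => (p.2, PySem.Int.toStr p.1)))).Nodup := by
    rw [List.map_map,
      show ((fun p : String × String => p.1) ∘ fun p : Int × String => (p.2, PySem.Int.toStr p.1)) = (fun p : Int × String => p.2) from rfl,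
      PySem.List.map_snd_enumerate]
    exact hu
  have := PySem.Dict.items_foldl_insert_fresh ((PySem.List.enumerate u).map (fun p => (p.2, PySem.Int.toStr p.1))) (fun p => p.1) (fun p => p.2) PySem.Dict.empty (by simp) h2
  simpa using this

theorem get?_mkFwd (u : List String) (q : String) (hu : u.Nodup) (h : q ∈ u) :
    (mkFwd u).get? q = some (PySem.Int.toStr (u.idxOf q : Int)) := by
  have hk : ((q, PySem.Int.toStr (u.idxOf q : Int))) ∈ (mkFwd u).items := by
    rw [items_mkFwd u hu]
    refine List.mem_map.mpr ⟨((u.idxOf q : Int), q), ?_, rfl⟩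
    exact (PySem.List.mem_enumerate_iff u 0 _).mpr ⟨u.idxOf q, List.idxOf_lt_length_of_mem h, by simp [List.getElem_idxOf]⟩
  exact PySem.Dict.get?_of_mem_items _ hk (by rw [keys_mkFwd]; exact PySem.Set.nodup_ofList u)

theorem mkFwd_append (u : List String) (q : String) :
    mkFwd (u ++ [q]) = (mkFwd u).insert q (PySem.Int.toStr (u.length : Int)) := by
  simp [mkFwd, PySem.List.enumerate_append, PySem.List.enumerate_cons, PySem.List.enumerate_nil,
        PySem.Dict.ofList, PySem.Dict.update, List.foldl_append]

theorem mkInv_append (u : List String) (q : String) :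
    mkInv (u ++ [q]) = (mkInv u).insert (PySem.Int.toStr (u.length : Int)) q := by
  simp [mkInv, PySem.List.enumerate_append, PySem.List.enumerate_cons, PySem.List.enumerate_nil,
        PySem.Dict.ofList, PySem.Dict.update, List.foldl_append]

theorem dedup_append_mem {xs : List String} {x : String} (h : x ∈ xs) :
    PySem.List.dedup (xs ++ [x]) = PySem.List.dedup xs := by
  simp only [PySem.List.dedup_eq_ofList, PySem.Set.ofList_append_singleton]
  exact PySem.Set.add_of_mem (by simpa [PySem.Set.mem_ofList] using h)

theorem dedup_append_not_mem {xs : List String} {x : String} (h : x ∉ xs) :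
    PySem.List.dedup (xs ++ [x]) = PySem.List.dedup xs ++ [x] := by
  simp only [PySem.List.dedup_eq_ofList, PySem.Set.ofList_append_singleton]
  exact PySem.Set.add_of_not_mem (by simpa [PySem.Set.mem_ofList] using h)

-- the per-pair entry of qa_id, expressed against the final unique lists
def ent (u v : List String) (qa : List (String × String)) : List (String × String) :=
  [("query", PySem.Int.toStr (u.idxOf (getVal qa "query") : Int)),
   ("answer", PySem.Int.toStr (v.idxOf (getVal qa "answer") : Int))]

def qcol (l : List (List (String × String))) : List String := l.map (fun qa => getVal qa "query")
def acol (l : List (List (String × String))) : List String := l.map (fun qa => getVal qa "answer")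

theorem map_ent_ext {l : List (List (String × String))} {U V U' V' : List String}
    (hU : ∀ s ∈ qcol l, U'.idxOf s = U.idxOf s) (hV : ∀ s ∈ acol l, V'.idxOf s = V.idxOf s) :
    List.map (ent U' V') l = List.map (ent U V) l := by
  apply List.map_congr_left
  intro y hy
  unfold ent
  rw [hU _ (List.mem_map.mpr ⟨y, hy, rfl⟩), hV _ (List.mem_map.mpr ⟨y, hy, rfl⟩)]

theorem foldA_eq (l : List (List (String × String))) (h : Pre_index_qas l) :
    l.foldl stepA ⟨[], [], .empty, .empty, .empty, .empty, []⟩ =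
    ⟨PySem.List.dedup (qcol l), PySem.List.dedup (acol l),
     mkFwd (PySem.List.dedup (qcol l)), mkFwd (PySem.List.dedup (acol l)),
     mkInv (PySem.List.dedup (qcol l)), mkInv (PySem.List.dedup (acol l)),
     l.map (ent (PySem.List.dedup (qcol l)) (PySem.List.dedup (acol l)))⟩ := by
  induction l using List.reverseRecOn with
  | nil => rfl
  | append_singleton l x ih =>
    have hsplit := h
    simp only [Pre_index_qas, List.all_append, List.all_cons, List.all_nil, Bool.and_true,
      Bool.and_eq_true] at hsplit
    have hpre_l : Pre_index_qas l := hsplit.1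
    have hxq := hsplit.2.1
    have hxc := hsplit.2.2
    have hq : (PySem.Dict.mk x).get? "query" = some (getVal x "query") := by
      rw [PySem.Dict.contains_eq_isSome_get?] at hxq
      cases hgq : (PySem.Dict.mk x).get? "query" with
      | none => rw [hgq] at hxq; simp at hxq
      | some v => simp [getVal, hgq]
    have hc : (PySem.Dict.mk x).get? "answer" = some (getVal x "answer") := by
      rw [PySem.Dict.contains_eq_isSome_get?] at hxc
      cases hgc : (PySem.Dict.mk x).get? "answer" with
      | none => rw [hgc] at hxc; simp at hxc
      | some v => simp [getVal, hgc]
    rw [List.foldl_append, List.foldl_cons, List.foldl_nil, ih hpre_l]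
    simp only [stepA, hq, hc]
    have hqcol : qcol (l ++ [x]) = qcol l ++ [getVal x "query"] := by simp [qcol]
    have hacol : acol (l ++ [x]) = acol l ++ [getVal x "answer"] := by simp [acol]
    have hnodU : (PySem.List.dedup (qcol l)).Nodup := PySem.List.nodup_dedup _
    have hnodV : (PySem.List.dedup (acol l)).Nodup := PySem.List.nodup_dedup _
    by_cases hqU : getVal x "query" ∈ PySem.List.dedup (qcol l)
    · have hU : PySem.List.dedup (qcol (l ++ [x])) = PySem.List.dedup (qcol l) := by
        rw [hqcol]; exact dedup_append_mem ((PySem.List.mem_dedup _ _).mp hqU)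
      by_cases hcV : getVal x "answer" ∈ PySem.List.dedup (acol l)
      · have hV : PySem.List.dedup (acol (l ++ [x])) = PySem.List.dedup (acol l) := by
          rw [hacol]; exact dedup_append_mem ((PySem.List.mem_dedup _ _).mp hcV)
        simp only [contains_mkFwd, hqU, hcV, decide_true, Bool.true_eq_false, if_false,
          hU, hV, List.map_append]
        congr 1
        congr 1
        simp only [List.map_cons, List.map_nil, ent]
        rw [get?_mkFwd _ _ hnodU hqU, get?_mkFwd _ _ hnodV hcV]
        rfl
      · have hV : PySem.List.dedup (acol (l ++ [x])) = PySem.List.dedup (acol l) ++ [getVal x "answer"] := by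
          rw [hacol]; exact dedup_append_not_mem (fun hm => hcV ((PySem.List.mem_dedup _ _).mpr hm))
        simp only [contains_mkFwd, hqU, hcV, decide_true, decide_false, Bool.true_eq_false,
          if_false, reduceIte, hU, hV, List.map_append, mkFwd_append, mkInv_append]
        congr 1
        congr 1
        · exact (map_ent_ext (fun s _ => rfl)
            (fun s hs => List.idxOf_append_of_mem ((PySem.List.mem_dedup _ _).mpr hs))).symm
        · have hidxc : (PySem.List.dedup (acol l) ++ [getVal x "answer"]).idxOf (getVal x "answer") = (PySem.List.dedup (acol l)).length := by
            simp [List.idxOf_append]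
            exact fun hm => absurd ((PySem.List.mem_dedup (acol l) _).mpr hm) hcV
          simp only [List.map_cons, List.map_nil, ent]
          rw [get?_mkFwd _ _ hnodU hqU, hidxc]
          rfl
    · have hU : PySem.List.dedup (qcol (l ++ [x])) = PySem.List.dedup (qcol l) ++ [getVal x "query"] := by
        rw [hqcol]; exact dedup_append_not_mem (fun hm => hqU ((PySem.List.mem_dedup _ _).mpr hm))
      by_cases hcV : getVal x "answer" ∈ PySem.List.dedup (acol l)
      · have hV : PySem.List.dedup (acol (l ++ [x])) = PySem.List.dedup (acol l) := by
          rw [hacol]; exact dedup_append_mem ((PySem.List.mem_dedup _ _).mp hcV)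
        simp only [contains_mkFwd, hqU, hcV, decide_true, decide_false, Bool.true_eq_false,
          if_false, reduceIte, hU, hV, List.map_append, mkFwd_append, mkInv_append]
        congr 1
        congr 1
        · exact (map_ent_ext
            (fun s hs => List.idxOf_append_of_mem ((PySem.List.mem_dedup _ _).mpr hs))
            (fun s _ => rfl)).symm
        · have hidxq : (PySem.List.dedup (qcol l) ++ [getVal x "query"]).idxOf (getVal x "query") = (PySem.List.dedup (qcol l)).length := by
            simp [List.idxOf_append]
            exact fun hm => absurd ((PySem.List.mem_dedup (qcol l) _).mpr hm) hqU
          simp only [List.map_cons, List.map_nil, ent]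
          rw [get?_mkFwd _ _ hnodV hcV, hidxq]
          rfl
      · have hV : PySem.List.dedup (acol (l ++ [x])) = PySem.List.dedup (acol l) ++ [getVal x "answer"] := by
          rw [hacol]; exact dedup_append_not_mem (fun hm => hcV ((PySem.List.mem_dedup _ _).mpr hm))
        simp only [contains_mkFwd, hqU, hcV, decide_false,
          reduceIte, hU, hV, List.map_append, mkFwd_append, mkInv_append]
        congr 1
        congr 1
        · exact (map_ent_ext
            (fun s hs => List.idxOf_append_of_mem ((PySem.List.mem_dedup _ _).mpr hs))
            (fun s hs => List.idxOf_append_of_mem ((PySem.List.mem_dedup _ _).mpr hs))).symm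
        · have hidxq : (PySem.List.dedup (qcol l) ++ [getVal x "query"]).idxOf (getVal x "query") = (PySem.List.dedup (qcol l)).length := by
            simp [List.idxOf_append]
            exact fun hm => absurd ((PySem.List.mem_dedup (qcol l) _).mpr hm) hqU
          have hidxc : (PySem.List.dedup (acol l) ++ [getVal x "answer"]).idxOf (getVal x "answer") = (PySem.List.dedup (acol l)).length := by
            simp [List.idxOf_append]
            exact fun hm => absurd ((PySem.List.mem_dedup (acol l) _).mpr hm) hcV
          simp only [List.map_cons, List.map_nil, ent]
          rw [hidxq, hidxc]

-- ===== VERDICT (by name: the statement is the Claim_ definition above) =====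
theorem index_qas_spec : Claim_equal_index_qas := by
  intro l _hdom hpre
  show index_qas l = index_qas_alt l
  rw [index_qas, foldA_eq l hpre, index_qas_alt]
  refine Prod.ext rfl (Prod.ext rfl (Prod.ext rfl (Prod.ext rfl ?_)))
  show List.map (ent (PySem.List.dedup (qcol l)) (PySem.List.dedup (acol l))) l = _
  rw [List.zip_map']
  rw [List.map_map]
  apply List.map_congr_left
  intro y hy
  have hqm : getVal y "query" ∈ PySem.List.dedup (List.map (fun qa => getVal qa "query") l) :=
    (PySem.List.mem_dedup _ _).mpr (List.mem_map.mpr ⟨y, hy, rfl⟩)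
  have ham : getVal y "answer" ∈ PySem.List.dedup (List.map (fun qa => getVal qa "answer") l) :=
    (PySem.List.mem_dedup _ _).mpr (List.mem_map.mpr ⟨y, hy, rfl⟩)
  simp only [Function.comp_apply, ent]
  rw [get?_mkFwd _ _ (PySem.List.nodup_dedup _) hqm, get?_mkFwd _ _ (PySem.List.nodup_dedup _) ham]
  rfl
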